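-- pv_equiv track=rewrite | github.com/icshwi/det_param_gen | python_client_emulator/ring_bringup_gen.py | get_cfg_mask
-- ===== SOURCE A (Python) =====
-- def get_cfg_mask(topology):
--     mask = 0xFFFFFFFF
--     for ring in topology:
--         if ring[1] != 0:
--             bitmask = (1 << (2*ring[0]))
--             mask = mask ^ (1 << (2*ring[0]))
--             bitmask = (1 << (2*ring[0])+1)
--             mask = mask ^ (1 << (2*ring[0]+1))
--
--     mask_n = mask ^ 0xFFFFFFFF
--     mask   = "0x" + format(mask, '08X')
--     mask_n = "0x" + format(mask_n, '08X')
--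
--     return mask, mask_n
-- ===== SOURCE B (Python) =====
-- def get_cfg_mask(topology):
--     counts = {}
--     for ring in topology:
--         if ring[1] != 0:
--             counts[ring[0]] = counts.get(ring[0], 0) + 1
--     mask = 0xFFFFFFFF
--     for key, cnt in counts.items():
--         if cnt % 2 == 1:
--             mask = mask ^ (3 << (2 * key))
--     mask_n = mask ^ 0xFFFFFFFF
--     return "0x" + format(mask, '08X'), "0x" + format(mask_n, '08X')
-- ===== Notes on version B (the rewrite author's own statement) =====
-- stated objective: alternative
-- what changed: Replaces per-occurrence XOR toggling of two single bits with a first pass counting occurrences of each key in a dict and a second pass over the distinct keys that XORs the combined pair 3<<2*key only when the count is odd.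
import Mathlib
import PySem

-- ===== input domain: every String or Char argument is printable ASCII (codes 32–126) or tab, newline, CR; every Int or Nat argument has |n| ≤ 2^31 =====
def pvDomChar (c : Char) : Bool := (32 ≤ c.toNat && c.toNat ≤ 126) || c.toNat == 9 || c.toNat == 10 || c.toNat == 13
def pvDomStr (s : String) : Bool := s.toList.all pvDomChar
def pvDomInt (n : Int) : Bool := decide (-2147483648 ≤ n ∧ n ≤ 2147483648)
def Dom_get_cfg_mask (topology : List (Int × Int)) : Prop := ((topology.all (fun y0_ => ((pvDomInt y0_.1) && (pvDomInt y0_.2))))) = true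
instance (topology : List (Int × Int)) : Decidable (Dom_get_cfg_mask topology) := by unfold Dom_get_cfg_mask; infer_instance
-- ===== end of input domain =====

-- B replaces per-occurrence XOR toggling of two single bits by a counting pass (dict) plus
-- one parity-based toggle of the combined pair 3 << 2*key per distinct key ("alternative", not faster).

-- shared helper: "0x" + format(n, '08X')  (uppercase hex, zero-padded to width 8; both programs
-- call it the same way, only on n ≥ 0)
def pvHexDigit (d : Nat) : Char := if d < 10 then Char.ofNat (48 + d) else Char.ofNat (55 + d)

def pvHexChars (n : Nat) : List Char :=
  if h : n < 16 then [pvHexDigit n]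
  else pvHexChars (n / 16) ++ [pvHexDigit (n % 16)]
decreasing_by exact Nat.div_lt_self (by omega) (by norm_num)

def pvFmt08X (n : Nat) : String :=
  let ds := pvHexChars n
  String.mk ('0' :: 'x' :: (List.replicate (8 - ds.length) '0' ++ ds))

-- ===== PORT A =====
def get_cfg_mask (topology : List (Int × Int)) : String × String :=
  let mask : Nat :=
    topology.foldl
      (fun (mask : Nat) (r : Int × Int) =>
        if r.2 ≠ 0 then
          (mask ^^^ 1 <<< (2 * r.1).toNat) ^^^ 1 <<< (2 * r.1 + 1).toNat
        else mask)
      0xFFFFFFFF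
  let mask_n := mask ^^^ 0xFFFFFFFF
  (pvFmt08X mask, pvFmt08X mask_n)

-- ===== PORT B =====
def get_cfg_mask_alt (topology : List (Int × Int)) : String × String :=
  let counts : PySem.Dict Int Int :=
    topology.foldl
      (fun (d : PySem.Dict Int Int) (r : Int × Int) =>
        if r.2 ≠ 0 then d.insert r.1 (d.getD r.1 0 + 1) else d)
      PySem.Dict.empty
  let mask : Nat :=
    counts.items.foldl
      (fun (mask : Nat) (kc : Int × Int) =>
        if PySem.Int.mod kc.2 2 == 1 then mask ^^^ 3 <<< (2 * kc.1).toNat else mask)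
      0xFFFFFFFF
  let mask_n := mask ^^^ 0xFFFFFFFF
  (pvFmt08X mask, pvFmt08X mask_n)

-- ===== PRECONDITION & SPEC =====
-- Pre_ excludes only inputs on which A raises: a ring with ring[1] ≠ 0 and a negative ring[0]
-- makes Python's '1 << (2*ring[0])' raise ValueError (negative shift count).
def Pre_get_cfg_mask (topology : List (Int × Int)) : Prop :=
  ∀ p ∈ topology, p.2 ≠ 0 → 0 ≤ p.1
instance (topology : List (Int × Int)) : Decidable (Pre_get_cfg_mask topology) := by unfold Pre_get_cfg_mask; infer_instance

def pvWitness_get_cfg_mask : (List (Int × Int)) := [(0, 1), (1, 2), (1, 2), (3, 0)]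

def Spec_get_cfg_mask (topology : List (Int × Int)) (out : String × String) : Prop := out = get_cfg_mask_alt topology
instance (topology : List (Int × Int)) (out : String × String) : Decidable (Spec_get_cfg_mask topology out) := by unfold Spec_get_cfg_mask; infer_instance

-- ===== CLAIM (what is proved, stated in full; the proofs are below) =====
def Claim_equal_get_cfg_mask : Prop := ∀ (topology : List (Int × Int)), Dom_get_cfg_mask topology → Pre_get_cfg_mask topology → Spec_get_cfg_mask topology (get_cfg_mask topology)

-- ===== LEMMAS AND PROOFS =====

-- the pair of single-bit toggles is one double-bit toggle
theorem pv_bitpair (a : Nat) : (1 <<< a) ^^^ (1 <<< (a + 1)) = 3 <<< a := by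
  have h : (1 : Nat) <<< (a + 1) = 2 <<< a := by
    simp [Nat.shiftLeft_eq, Nat.pow_succ]; ring
  have h3 : (1 ^^^ 2 : Nat) = 3 := by decide
  rw [h, ← Nat.shiftLeft_xor_distrib, h3]

-- xor-fold of a toggle function over a list of keys
def pvXfold (h : Int → Nat) (l : List Int) (M : Nat) : Nat :=
  l.foldl (fun m k => m ^^^ h k) M

theorem pvXfold_cons (h : Int → Nat) (a : Int) (l : List Int) (M : Nat) :
    pvXfold h (a :: l) M = pvXfold h l (M ^^^ h a) := rfl

theorem pvXfold_singleton (h : Int → Nat) (a : Int) (M : Nat) :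
    pvXfold h [a] M = M ^^^ h a := rfl

theorem pvXfold_append (h : Int → Nat) (l₁ l₂ : List Int) (M : Nat) :
    pvXfold h (l₁ ++ l₂) M = pvXfold h l₂ (pvXfold h l₁ M) :=
  List.foldl_append

theorem pvXfold_shift (h : Int → Nat) (l : List Int) (M : Nat) :
    pvXfold h l M = M ^^^ pvXfold h l 0 := by
  induction l generalizing M with
  | nil => simp [pvXfold]
  | cons a t ih =>
    rw [pvXfold_cons, pvXfold_cons, ih (M ^^^ h a), ih (0 ^^^ h a)]
    simp [Nat.xor_assoc]

theorem pvXfold_congr (h h' : Int → Nat) (l : List Int) (M : Nat)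
    (hc : ∀ k ∈ l, h k = h' k) : pvXfold h l M = pvXfold h' l M := by
  unfold pvXfold
  apply PySem.List.foldl_congr_mem
  intro acc k hk
  rw [hc k hk]

-- pure xor bookkeeping used in the core step
theorem pv_xor_shuffle (A b c X : Nat) : ((A ^^^ b) ^^^ X) ^^^ c = (A ^^^ (b ^^^ c)) ^^^ X := by
  simp [Nat.xor_assoc, Nat.xor_comm X c]

-- parity toggle function of a key list
def pvPar (g : Int → Nat) (ks : List Int) (k : Int) : Nat :=
  if ks.count k % 2 = 1 then g k else 0

-- core: xor-folding g over all occurrences equals xor-folding the parity toggles over the distinct keys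
theorem pv_core (g : Int → Nat) (ks : List Int) (M : Nat) :
    pvXfold g ks M = pvXfold (pvPar g ks) (PySem.Set.ofList ks) M := by
  induction ks using List.reverseRecOn generalizing M with
  | nil => simp [pvXfold, PySem.Set.ofList]
  | append_singleton ks k ih =>
    have hpar_ne : ∀ j : Int, j ≠ k → pvPar g (ks ++ [k]) j = pvPar g ks j := by
      intro j hj
      simp [pvPar, List.count_append, Ne.symm hj]
    have hpar_k : pvPar g (ks ++ [k]) k = pvPar g ks k ^^^ g k := by
      simp only [pvPar, List.count_append, List.count_singleton, beq_self_eq_true]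
      rcases Nat.mod_two_eq_zero_or_one (ks.count k) with hp | hp <;>
        simp [Nat.add_mod, hp]
    have hL : pvXfold g (ks ++ [k]) M = pvXfold g ks M ^^^ g k := by
      rw [pvXfold_append, pvXfold_singleton]
    rw [hL, ih, PySem.Set.ofList_append_singleton]
    by_cases hk : k ∈ PySem.Set.ofList ks
    · rw [PySem.Set.add_of_mem hk]
      obtain ⟨s₁, s₂, hsplit⟩ := List.append_of_mem hk
      have hnd : (PySem.Set.ofList ks).Nodup := PySem.Set.nodup_ofList ks
      rw [hsplit] at hnd
      simp [List.nodup_append, List.nodup_cons] at hnd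
      have hk1 : k ∉ s₁ := fun hm => (hnd.2.2 k hm).1 rfl
      have hk2 : k ∉ s₂ := hnd.2.1.1
      have e1 : pvXfold (pvPar g (ks ++ [k])) s₁ M = pvXfold (pvPar g ks) s₁ M :=
        pvXfold_congr _ _ _ _ (fun j hj => hpar_ne j (fun hjk => hk1 (hjk ▸ hj)))
      have e2 : ∀ X, pvXfold (pvPar g (ks ++ [k])) s₂ X = pvXfold (pvPar g ks) s₂ X :=
        fun X => pvXfold_congr _ _ _ _ (fun j hj => hpar_ne j (fun hjk => hk2 (hjk ▸ hj)))
      rw [hsplit, pvXfold_append, pvXfold_append, pvXfold_cons, pvXfold_cons,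
        e1, e2, hpar_k,
        pvXfold_shift (pvPar g ks) s₂ (pvXfold (pvPar g ks) s₁ M ^^^ pvPar g ks k),
        pvXfold_shift (pvPar g ks) s₂ (pvXfold (pvPar g ks) s₁ M ^^^ (pvPar g ks k ^^^ g k))]
      exact pv_xor_shuffle _ _ _ _
    · rw [PySem.Set.add_of_not_mem hk, pvXfold_append, pvXfold_singleton]
      have e1 : pvXfold (pvPar g (ks ++ [k])) (PySem.Set.ofList ks) M
          = pvXfold (pvPar g ks) (PySem.Set.ofList ks) M :=
        pvXfold_congr _ _ _ _ (fun j hj => hpar_ne j (fun hjk => hk (hjk ▸ hj)))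
      have hcnt : ks.count k = 0 := by
        rw [List.count_eq_zero]
        intro hmem
        exact hk ((PySem.Set.mem_ofList _ _).mpr hmem)
      rw [e1, hpar_k]
      simp [pvPar, hcnt]

-- the masks computed by the two ports agree (under Pre_)
theorem pv_mask_eq (topology : List (Int × Int)) (hpre : Pre_get_cfg_mask topology) :
    topology.foldl
      (fun (mask : Nat) (r : Int × Int) =>
        if r.2 ≠ 0 then
          (mask ^^^ 1 <<< (2 * r.1).toNat) ^^^ 1 <<< (2 * r.1 + 1).toNat
        else mask) 0xFFFFFFFF
    = (topology.foldl
        (fun (d : PySem.Dict Int Int) (r : Int × Int) =>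
          if r.2 ≠ 0 then d.insert r.1 (d.getD r.1 0 + 1) else d)
        PySem.Dict.empty).items.foldl
        (fun (mask : Nat) (kc : Int × Int) =>
          if PySem.Int.mod kc.2 2 == 1 then mask ^^^ 3 <<< (2 * kc.1).toNat else mask)
        0xFFFFFFFF := by
  set ks : List Int := (topology.filter (fun r => decide (r.2 ≠ 0))).map Prod.fst with hks
  set g : Int → Nat := fun k => 3 <<< (2 * k).toNat with hg
  have hmem : ∀ k ∈ ks, (0 : Int) ≤ k := by
    intro k hkmem
    rw [hks] at hkmem
    obtain ⟨r, hr, hrk⟩ := List.mem_map.mp hkmem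
    have := List.mem_filter.mp hr
    exact hrk ▸ hpre r this.1 (by simpa using this.2)
  have hA : topology.foldl
      (fun (mask : Nat) (r : Int × Int) =>
        if r.2 ≠ 0 then
          (mask ^^^ 1 <<< (2 * r.1).toNat) ^^^ 1 <<< (2 * r.1 + 1).toNat
        else mask) 0xFFFFFFFF = pvXfold g ks 0xFFFFFFFF := by
    rw [PySem.List.foldl_ite_eq_foldl_filter]
    unfold pvXfold
    rw [hks, List.foldl_map]
    apply PySem.List.foldl_congr_mem
    intro m r hr
    have h0 : (0 : Int) ≤ r.1 := hmem r.1 (by rw [hks]; exact List.mem_map.mpr ⟨r, hr, rfl⟩)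
    have ht : (2 * r.1 + 1).toNat = (2 * r.1).toNat + 1 := by omega
    rw [ht, Nat.xor_assoc, pv_bitpair]
  have hB : (topology.foldl
        (fun (d : PySem.Dict Int Int) (r : Int × Int) =>
          if r.2 ≠ 0 then d.insert r.1 (d.getD r.1 0 + 1) else d)
        PySem.Dict.empty).items.foldl
        (fun (mask : Nat) (kc : Int × Int) =>
          if PySem.Int.mod kc.2 2 == 1 then mask ^^^ 3 <<< (2 * kc.1).toNat else mask)
        0xFFFFFFFF
      = pvXfold (pvPar g ks) (PySem.Set.ofList ks) 0xFFFFFFFF := by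
    have hdict : topology.foldl
        (fun (d : PySem.Dict Int Int) (r : Int × Int) =>
          if r.2 ≠ 0 then d.insert r.1 (d.getD r.1 0 + 1) else d)
        PySem.Dict.empty
        = PySem.Dict.counter ks := by
      rw [PySem.List.foldl_ite_eq_foldl_filter,
        ← PySem.Dict.foldl_insert_getD_add_one_eq_counter, hks, List.foldl_map]
    rw [hdict, PySem.Dict.items_counter, List.foldl_map]
    unfold pvXfold
    apply PySem.List.foldl_congr_mem
    intro m k _
    show (if PySem.Int.mod ((ks.count k : Nat) : Int) 2 == 1 then m ^^^ 3 <<< (2 * k).toNat else m)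
        = m ^^^ pvPar g ks k
    have hm : PySem.Int.mod ((ks.count k : Nat) : Int) 2 = ((ks.count k % 2 : Nat) : Int) := by
      rw [PySem.Int.mod_eq_emod_of_pos (by norm_num)]
      exact_mod_cast (Int.natCast_mod (ks.count k) 2).symm
    rw [hm]
    rcases Nat.mod_two_eq_zero_or_one (ks.count k) with hp | hp <;>
      simp [pvPar, hp, hg]
  rw [hA, hB, pv_core]

-- ===== VERDICT (by name: the statement is the Claim_ definition above) =====
theorem get_cfg_mask_spec : Claim_equal_get_cfg_mask := by
  intro topology _ hpre
  unfold Spec_get_cfg_mask get_cfg_mask get_cfg_mask_alt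
  rw [pv_mask_eq topology hpre]
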